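-- pv_equiv track=rewrite | github.com/K0stya666/lab_inf1 | №11.1.py | f
-- ===== SOURCE A (Python) =====
-- def f(A):
--     A = str(A)
--     if A.count('1')+A.count('0')!=len(A): return None
--     ryad_fib = [1, 1]
--     for i in range(len(A)):
--         ryad_fib.append(ryad_fib[-1] + ryad_fib[-2])
--     A = A[-1::-1]
--     res = 0
--     ryad_fib=ryad_fib[1:]
--     for i in range(len(A)-1,-1,-1):
--         res += ryad_fib[i] * int(A[i])
--     return res
-- ===== SOURCE B (Python) =====
-- def f(A):
--     A = str(A)
--     u = v = 0
--     for ch in A: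
--         if ch == '1':
--             u, v = v + 1, u + v + 2
--         elif ch == '0':
--             u, v = v, u + v
--         else:
--             return None
--     return u
-- ===== Notes on version B (the rewrite author's own statement) =====
-- stated objective: alternative
-- what changed: Replaces the count-based validation, the precomputed Fibonacci table, the reversal slice and the indexed right-to-left summation by a single LEFT-to-right pass over str(A) that composes the linear update (u,v) -> (v+d, u+v+2d) per digit and rejects a non-binary character on sight, using the identity that appending a digit shifts every Fibonacci weight one step.
import Mathlib
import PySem

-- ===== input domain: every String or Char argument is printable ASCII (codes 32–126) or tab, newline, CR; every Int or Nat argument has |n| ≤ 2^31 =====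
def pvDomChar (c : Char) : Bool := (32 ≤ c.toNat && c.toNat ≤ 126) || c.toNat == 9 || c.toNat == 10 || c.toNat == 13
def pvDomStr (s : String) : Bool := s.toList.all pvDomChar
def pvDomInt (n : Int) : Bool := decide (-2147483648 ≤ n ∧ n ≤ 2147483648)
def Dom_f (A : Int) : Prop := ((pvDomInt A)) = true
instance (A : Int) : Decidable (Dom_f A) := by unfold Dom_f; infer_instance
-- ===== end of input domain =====

-- B replaces the count guard, the Fibonacci table, the reversal slice and the indexed
-- right-to-left sum by ONE left-to-right pass composing the per-digit linear update
-- (u,v) -> (v+d, u+v+2d), rejecting a non-binary character on sight (objective: alternative).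

-- ===== PORT A =====
-- str(A) is worked on as its List Char form (PySem.Int.toChars).
-- The indexings ryad_fib[-1], ryad_fib[-2] and the two reads in the sum loop use
-- pyGetD: exact, because the list always has length ≥ 2 during the build and the
-- loop indices 0..len-1 are always in range; likewise int(A[i]) via
-- (ofChars? …).getD 0 is exact since after the guard every character is '0' or '1'.
def f (A : Int) : Option Int :=
  let s : List Char := PySem.Int.toChars A
  if ((PySem.Chars.count s ['1'] : Int) + (PySem.Chars.count s ['0'] : Int)) ≠ PySem.Chars.len s then
    none
  else
    let fib : List Int :=
      (PySem.List.pyRange 0 (PySem.Chars.len s) 1).foldl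
        (fun l _ => l ++ [PySem.List.pyGetD l (-1) 0 + PySem.List.pyGetD l (-2) 0]) [1, 1]
    let arev : List Char := (PySem.List.slice? s (some (-1)) none (-1)).getD []  -- A[-1::-1]
    let fibs : List Int := PySem.List.slice fib (some 1) none                    -- ryad_fib[1:]
    some ((PySem.List.pyRange (PySem.Chars.len arev - 1) (-1) (-1)).foldl
      (fun res i =>
        res + PySem.List.pyGetD fibs i 0 *
          (PySem.Int.ofChars? [PySem.List.pyGetD arev i ' ']).getD 0) 0)

-- ===== PORT B =====
-- Source B's early 'return None' inside the for loop is modelled by an Option state that,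
-- once none, absorbs the remaining iterations (exact: after the return nothing changes).
def fStep (st : Option (Int × Int)) (ch : Char) : Option (Int × Int) :=
  match st with
  | none => none
  | some (u, v) =>
    if ch = '1' then some (v + 1, u + v + 2)
    else if ch = '0' then some (v, u + v)
    else none

def f_alt (A : Int) : Option Int :=
  ((PySem.Int.toChars A).foldl fStep (some (0, 0))).map (fun p => p.1)

-- ===== PRECONDITION & SPEC =====
def Spec_f (A : Int) (out : Option Int) : Prop := out = f_alt A
instance (A : Int) (out : Option Int) : Decidable (Spec_f A out) := by unfold Spec_f; infer_instance

-- ===== CLAIM (what is proved, stated in full; the proofs are below) =====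
def Claim_equal_f : Prop := ∀ (A : Int), Dom_f A → Spec_f A (f A)

-- ===== LEMMAS AND PROOFS =====

-- A[-1::-1] is the full reverse (start -1 names the last character, the default for step -1)
theorem slice_neg1 (s : List Char) : PySem.List.slice? s (some (-1)) none (-1) = some s.reverse := by
  have h : PySem.List.sliceIndices s.length (some (-1)) none (-1)
         = PySem.List.sliceIndices s.length none none (-1) := by
    simp [PySem.List.sliceIndices]; omega
  rw [show PySem.List.slice? s (some (-1)) none (-1)
        = PySem.List.slice? s none none (-1) from by
      simp [PySem.List.slice?, h], PySem.List.slice?_none_none_neg_one]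

def gfib : Nat → Int
  | 0 => 1
  | 1 => 1
  | n + 2 => gfib n + gfib (n + 1)
def fibList (m : Nat) : List Int := (List.range m).map gfib
def pvDig (c : Char) : Int := (PySem.Int.ofChars? [c]).getD 0
def wsum : List Char → Nat → Int
  | [], _ => 0
  | ch :: t, a => gfib (a + 1) * pvDig ch + wsum t (a + 1)
def isBin (c : Char) : Bool := c == '1' || c == '0'

lemma fibList_length (m : Nat) : (fibList m).length = m := by simp [fibList]

lemma fibList_snoc (m : Nat) (hm : 2 ≤ m) :
    fibList m ++ [PySem.List.pyGetD (fibList m) (-1) 0 + PySem.List.pyGetD (fibList m) (-2) 0]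
      = fibList (m + 1) := by
  obtain ⟨k, rfl⟩ : ∃ k, m = k + 2 := ⟨m - 2, by omega⟩
  rw [PySem.List.pyGetD_neg_ofNat (fibList (k+2)) 1 0 (by omega) (by rw [fibList_length]; omega)]
  rw [PySem.List.pyGetD_neg_ofNat (fibList (k+2)) 2 0 (by omega) (by rw [fibList_length]; omega)]
  simp [fibList, List.range_succ]
  rw [show gfib (k + 2) = gfib k + gfib (k + 1) from rfl]
  ring

lemma build_loop {α : Type} (l : List α) (m : Nat) (hm : 2 ≤ m) :
    l.foldl (fun acc (_ : α) =>
        acc ++ [PySem.List.pyGetD acc (-1) 0 + PySem.List.pyGetD acc (-2) 0]) (fibList m)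
      = fibList (m + l.length) := by
  induction l generalizing m with
  | nil => simp
  | cons x t ih =>
    simp only [List.foldl_cons, fibList_snoc m hm, List.length_cons]
    rw [ih (m + 1) (by omega)]
    congr 1
    omega

lemma wsum_eq_sum (l : List Char) (a : Nat) :
    wsum l a = ((List.range l.length).map (fun i => gfib (a + 1 + i) * pvDig (l.getD i ' '))).sum := by
  induction l generalizing a with
  | nil => simp [wsum]
  | cons ch t ih =>
    simp only [wsum, List.length_cons, List.range_succ_eq_map, List.map_cons, List.map_map,
      List.sum_cons, Function.comp_def, List.getD_cons_zero, List.getD_cons_succ]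
    rw [ih (a + 1)]
    congr 2
    apply List.map_congr_left
    intro i hi
    rw [show a + 1 + i.succ = a + 1 + 1 + i by omega]

lemma fibList_tail (m : Nat) :
    (fibList (m + 1)).tail = (List.range m).map (fun i => gfib (i + 1)) := by
  simp [fibList, List.range_succ_eq_map, List.map_map, Function.comp_def]

lemma list_sum_range_eq_finset (n : Nat) (g : Nat → Int) :
    ((List.range n).map g).sum = ∑ i ∈ Finset.range n, g i := rfl

lemma A_core_eq (l : List Char) :
    ((PySem.List.pyRange ((l.length : Int) - 1) (-1) (-1)).foldl
      (fun res i =>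
        res + PySem.List.pyGetD (PySem.List.slice (fibList (l.length + 2)) (some 1) none) i 0 *
          (PySem.Int.ofChars? [PySem.List.pyGetD l i ' ']).getD 0) 0)
      = wsum l 0 := by
  set n := l.length with hn
  rw [PySem.List.slice_from_one, show n + 2 = (n + 1) + 1 from rfl, fibList_tail,
      PySem.List.pyRange_neg_one, show ((n : Int) - 1 - (-1)).toNat = n by omega,
      List.foldl_map, PySem.List.foldl_add]
  rw [List.map_congr_left (g := fun k =>
        gfib ((n - 1 - k) + 1) * pvDig (l.getD (n - 1 - k) ' ')) ?_]
  · rw [list_sum_range_eq_finset,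
        Finset.sum_range_reflect (fun j => gfib (j + 1) * pvDig (l.getD j ' ')) n,
        wsum_eq_sum, list_sum_range_eq_finset]
    simp only [zero_add, ← hn]
    apply Finset.sum_congr rfl
    intro j hj
    rw [show 1 + j = j + 1 by omega]
  · intro k hk
    have hk' : k < n := List.mem_range.mp hk
    rw [show (n : Int) - 1 - (k : Nat) = ((n - 1 - k : Nat) : Int) by omega]
    rw [PySem.List.pyGetD_natCast, PySem.List.pyGetD_natCast]
    congr 1
    rw [List.getD, List.getElem?_map, List.getElem?_range (by omega)]
    rfl

-- single-character Chars.count is List.count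
lemma count_go_single (c : Char) (s : List Char) (fuel acc : Nat) (h : s.length ≤ fuel) :
    PySem.Chars.count.go [c] fuel s acc = acc + s.count c := by
  induction s generalizing fuel acc with
  | nil => cases fuel <;> simp [PySem.Chars.count.go]
  | cons hd t ih =>
    obtain ⟨f, rfl⟩ : ∃ f, fuel = f + 1 := ⟨fuel - 1, by simp at h; omega⟩
    have ht : t.length ≤ f := by simp at h; omega
    by_cases hc : hd = c
    · subst hc
      rw [show PySem.Chars.count.go [hd] (f + 1) (hd :: t) acc
            = PySem.Chars.count.go [hd] f t (acc + 1) from by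
        simp [PySem.Chars.count.go, List.isPrefixOf]]
      rw [ih f (acc + 1) ht]
      simp
      omega
    · rw [show PySem.Chars.count.go [c] (f + 1) (hd :: t) acc
            = PySem.Chars.count.go [c] f t acc from by
        simp [PySem.Chars.count.go, List.isPrefixOf, Ne.symm hc]]
      rw [ih f acc ht]
      simp [hc]

lemma count_single (c : Char) (s : List Char) :
    PySem.Chars.count s [c] = s.count c := by
  rw [show PySem.Chars.count s [c] = PySem.Chars.count.go [c] s.length s 0 from by
    simp [PySem.Chars.count]]
  simpa using count_go_single c s s.length 0 (le_refl _)

-- A's guard succeeds exactly when every character is '0' or '1'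
lemma guard_iff (s : List Char) :
    (((PySem.Chars.count s ['1'] : Int) + (PySem.Chars.count s ['0'] : Int)) = PySem.Chars.len s)
      ↔ s.all isBin = true := by
  rw [count_single, count_single, PySem.Chars.len_eq]
  have hcc : s.count '1' + s.count '0' = s.countP isBin := by
    induction s with
    | nil => rfl
    | cons hd t ih =>
      simp only [List.count_cons, List.countP_cons]
      by_cases h1 : hd = '1'
      · simp [h1, isBin]; omega
      · by_cases h0 : hd = '0'
        · simp [h0, isBin]; omega
        · simp [h0, h1, isBin, ih]
    
  constructor
  · intro h
    have h1 : s.count '1' + s.count '0' = s.length := by exact_mod_cast h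
    have hl : s.countP isBin = s.length := by omega
    exact List.all_eq_true.mpr (fun x hx => List.countP_eq_length.mp hl x hx)
  · intro h
    have hl : s.countP isBin = s.length :=
      List.countP_eq_length.mpr (fun a ha => List.all_eq_true.mp h a ha)
    have h1 : s.count '1' + s.count '0' = s.length := by omega
    exact_mod_cast h1

-- B's fold: none is absorbing (the early return)
lemma fold_none (l : List Char) : l.foldl fStep none = none := by
  induction l with
  | nil => rfl
  | cons hd t ih => simp [List.foldl_cons, fStep, ih]

-- B's fold returns none as soon as a non-binary character appears
lemma fold_invalid (l : List Char) (st : Option (Int × Int)) (h : l.all isBin = false) :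
    l.foldl fStep st = none := by
  induction l generalizing st with
  | nil => simp at h
  | cons hd t ih =>
    by_cases hb : isBin hd = true
    · rw [List.all_cons, hb, Bool.true_and] at h
      exact ih _ h
    · have h1 : hd ≠ '1' := by intro e; subst e; simp [isBin] at hb
      have h0 : hd ≠ '0' := by intro e; subst e; simp [isBin] at hb
      cases st with
      | none => simpa [List.foldl_cons, fStep] using fold_none t
      | some p =>
        obtain ⟨u, v⟩ := p
        simpa [List.foldl_cons, fStep, h1, h0] using fold_none t
  
lemma wsum_add (l : List Char) (a : Nat) :
    wsum l a + wsum l (a + 1) = wsum l (a + 2) := by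
  induction l generalizing a with
  | nil => simp [wsum]
  | cons ch t ih =>
    simp only [wsum]
    rw [show gfib (a + 2 + 1) = gfib (a + 1) + gfib (a + 1 + 1) from rfl, ← ih (a + 1)]
    ring

-- B's fold on a valid string computes the Fibonacci-weighted sum
lemma fold_valid (r : List Char) (h : r.all isBin = true) :
    r.reverse.foldl fStep (some (0, 0)) = some (wsum r 0, wsum r 1) := by
  induction r with
  | nil => simp [wsum]
  | cons ch t ih =>
    simp only [List.all_cons, Bool.and_eq_true] at h
    rw [List.reverse_cons, List.foldl_append, ih h.2, List.foldl_cons, List.foldl_nil]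
    have hd1 : pvDig '1' = 1 := by decide
    have hd0 : pvDig '0' = 0 := by decide
    rcases (by simpa [isBin] using h.1 : ch = '1' ∨ ch = '0') with rfl | rfl
    · simp only [fStep, wsum, hd1]
      rw [show gfib 1 = 1 from rfl, show gfib 2 = 2 from rfl, ← wsum_add t 0]
      simp only [reduceIte, Option.some.injEq, Prod.mk.injEq]
      constructor <;> ring
    · simp only [fStep, wsum, hd0]
      rw [show gfib 1 = 1 from rfl, show gfib 2 = 2 from rfl, ← wsum_add t 0,
          if_neg (by decide : ¬ ('0' : Char) = '1')]
      simp only [if_true, Option.some.injEq, Prod.mk.injEq]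
      constructor <;> ring

-- ===== VERDICT (by name: the statement is the Claim_ definition above) =====
theorem f_spec : Claim_equal_f := by
  unfold Claim_equal_f
  intro A _
  unfold Spec_f f f_alt
  set s := PySem.Int.toChars A with hs
  by_cases hv : s.all isBin = true
  · have hg : ¬ (((PySem.Chars.count s ['1'] : Int) + (PySem.Chars.count s ['0'] : Int))
        ≠ PySem.Chars.len s) := by
      exact not_not_intro ((guard_iff s).mpr hv)
    simp only [if_neg hg]
    have hvrev : s.reverse.all isBin = true := by
      rw [List.all_eq_true] at hv ⊢
      intro x hx
      exact hv x (List.mem_reverse.mp hx)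
    have hB := fold_valid s.reverse hvrev
    rw [List.reverse_reverse] at hB
    rw [hB]
    simp only [Option.map_some]
    congr 1
    rw [show (PySem.List.slice? s (some (-1)) none (-1)).getD ([] : List Char) = s.reverse from by
      rw [slice_neg1]; rfl]
    have hlen : PySem.List.pyRange 0 (PySem.Chars.len s) 1
        = PySem.List.pyRange 0 (s.length : Int) 1 := by simp
    rw [hlen, show ([1, 1] : List Int) = fibList 2 from rfl,
        build_loop (PySem.List.pyRange 0 (s.length : Int) 1) 2 (by omega),
        PySem.List.length_pyRange_one, show ((s.length : Int) - 0).toNat = s.length by omega]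
    have hA := A_core_eq s.reverse
    rw [List.length_reverse] at hA
    rw [show PySem.Chars.len s.reverse = (s.reverse.length : Int) from by simp,
        List.length_reverse, show 2 + s.length = s.length + 2 by omega, hA]
  · have hg : (((PySem.Chars.count s ['1'] : Int) + (PySem.Chars.count s ['0'] : Int))
        ≠ PySem.Chars.len s) := by
      intro h
      exact hv ((guard_iff s).mp h)
    simp only [if_pos hg]
    rw [fold_invalid s (some (0, 0)) (by simpa using hv)]
    rfl
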